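-- pv_equiv track=rewrite | github.com/tamarigoa/GOA-Homeworks | day 26/classwork/clswrk.py | manual_title
-- ===== SOURCE A (Python) =====
-- def manual_title(string1):
--     is_space = False
--
--     result = ""
--
--     for i in string1:
--         if i == " ":
--             result += i
--             is_space = True
--         elif is_space:
--             result += i.upper()
--             is_space = False
--         else:
--             result += i.lower()
--
--     return result[0].upper() + result[1:]
-- ===== SOURCE B (Python) =====
-- def manual_title(string1):
--     return " ".join(w[:1].upper() + w[1:].lower() for w in string1.split(" "))
-- ===== Notes on version B (the rewrite author's own statement) =====
-- stated objective: faster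
-- what changed: Replaced the stateful character-by-character scan that grows the result by repeated string concatenation (plus a final first-character fixup) with a split-on-space/capitalize-each-word/join one-liner.
import Mathlib
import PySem

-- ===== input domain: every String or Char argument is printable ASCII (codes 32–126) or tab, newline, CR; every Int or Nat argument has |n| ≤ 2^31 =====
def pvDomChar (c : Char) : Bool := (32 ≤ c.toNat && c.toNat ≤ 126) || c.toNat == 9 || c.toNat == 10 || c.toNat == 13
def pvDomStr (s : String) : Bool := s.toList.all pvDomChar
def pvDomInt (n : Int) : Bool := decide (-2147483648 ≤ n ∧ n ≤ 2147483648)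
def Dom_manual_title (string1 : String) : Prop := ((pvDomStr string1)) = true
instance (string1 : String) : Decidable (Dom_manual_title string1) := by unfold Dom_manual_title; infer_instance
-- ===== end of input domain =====

-- B replaces A's stateful character scan (space flag, repeated string concatenation, final
-- first-character fixup) by a split-on-space/capitalize-each-word/join decomposition,
-- measurably faster since it avoids A's repeated str concatenation.

-- ===== PORT A =====
def manual_title (string1 : String) : String :=
  let st :=
    string1.toList.foldl
      (fun (st : Bool × List Char) i =>
        if i = ' ' then (true, st.2 ++ [i])
        else if st.1 then (false, st.2 ++ [PySem.Chars.upperChar i])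
        else (st.1, st.2 ++ [PySem.Chars.lowerChar i]))
      (false, ([] : List Char))
  match PySem.List.pyGet? st.2 0 with
  | some c => String.mk (PySem.Chars.upperChar c :: PySem.List.slice st.2 (some 1) none)
  | none => ""   -- result[0] raises IndexError here (only for string1 = ""); excluded by Pre_

-- ===== PORT B =====
-- w[:1].upper() + w[1:].lower()
def pvCapWord (w : List Char) : List Char :=
  PySem.Chars.upper (PySem.List.slice w none (some 1)) ++
    PySem.Chars.lower (PySem.List.slice w (some 1) none)

def manual_title_alt (string1 : String) : String :=
  String.mk (PySem.Chars.join [' '] ((PySem.Chars.splitOn string1.toList [' ']).map pvCapWord))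

-- ===== PRECONDITION & SPEC =====
-- Pre_ excludes only the empty string, on which A raises IndexError (result[0] of "").
def Pre_manual_title (string1 : String) : Prop := string1 ≠ ""
instance (string1 : String) : Decidable (Pre_manual_title string1) := by unfold Pre_manual_title; infer_instance
def pvWitness_manual_title : String := "heLLo  worLD x"

def Spec_manual_title (string1 : String) (out : String) : Prop := out = manual_title_alt string1
instance (string1 : String) (out : String) : Decidable (Spec_manual_title string1 out) := by unfold Spec_manual_title; infer_instance

-- ===== CLAIM (what is proved, stated in full; the proofs are below) =====
def Claim_equal_manual_title : Prop := ∀ (string1 : String), Dom_manual_title string1 → Pre_manual_title string1 → Spec_manual_title string1 (manual_title string1)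

-- ===== LEMMAS AND PROOFS =====

-- B's algorithm, rephrased as A's scan: capitalize-after-space recursion over the characters.
def pvLoop : Bool → List Char → List Char
  | _, [] => []
  | b, c :: r =>
    if c = ' ' then ' ' :: pvLoop true r
    else (if b then PySem.Chars.upperChar c else PySem.Chars.lowerChar c) :: pvLoop false r

-- split on a single space, recursively
def pvSplitSp : List Char → List (List Char)
  | [] => [[]]
  | c :: r =>
    if c = ' ' then [] :: pvSplitSp r
    else match pvSplitSp r with
      | [] => [[c]]
      | w :: ws => (c :: w) :: ws

def pvConsHead (cur : List Char) : List (List Char) → List (List Char)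
  | [] => []
  | w :: ws => (cur.reverse ++ w) :: ws

theorem pvSplitSp_ne_nil (l : List Char) : pvSplitSp l ≠ [] := by
  induction l with
  | nil => simp [pvSplitSp]
  | cons c r ih =>
    simp only [pvSplitSp]
    split
    · simp
    · split <;> simp_all

theorem pvUpperLower (c : Char) : PySem.Chars.upperChar (PySem.Chars.lowerChar c) = PySem.Chars.upperChar c := by
  unfold PySem.Chars.upperChar PySem.Chars.lowerChar PySem.Chars.islower PySem.Chars.isupper
  by_cases h : 'A' ≤ c ∧ c ≤ 'Z'
  · have h1 : 65 ≤ c.toNat := h.1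
    have h2 : c.toNat ≤ 90 := h.2
    have hv : (c.toNat + 32).isValidChar := by left; omega
    have ht : (Char.ofNat (c.toNat + 32)).toNat = c.toNat + 32 := by
      rw [Char.toNat_ofNat]; simp [hv]
    have hlo : 'a' ≤ Char.ofNat (c.toNat + 32) := show 97 ≤ (Char.ofNat (c.toNat+32)).toNat by omega
    have hhi : Char.ofNat (c.toNat + 32) ≤ 'z' := show (Char.ofNat (c.toNat+32)).toNat ≤ 122 by omega
    have hne : ¬ ('a' ≤ c ∧ c ≤ 'z') := by
      rintro ⟨ha, _⟩; have : 97 ≤ c.toNat := ha; omega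
    simp [h, hlo, hhi, hne]
    apply Char.ext
    apply UInt32.toNat_inj.mp
    show (Char.ofNat ((Char.ofNat (c.toNat + 32)).toNat - 32)).toNat = c.toNat
    rw [ht]
    have hv2 : (c.toNat + 32 - 32).isValidChar := by left; omega
    rw [Char.toNat_ofNat, if_pos hv2]; omega
  · simp [h]

-- A's foldl accumulates exactly pvLoop
theorem pvFold_eq (cs : List Char) : ∀ (b : Bool) (acc : List Char),
    (cs.foldl
      (fun (st : Bool × List Char) i =>
        if i = ' ' then (true, st.2 ++ [i])
        else if st.1 then (false, st.2 ++ [PySem.Chars.upperChar i])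
        else (st.1, st.2 ++ [PySem.Chars.lowerChar i]))
      (b, acc)).2 = acc ++ pvLoop b cs := by
  induction cs with
  | nil => intro b acc; simp [pvLoop]
  | cons c r ih =>
    intro b acc
    by_cases hc : c = ' '
    · subst hc; simp [List.foldl_cons, pvLoop, ih]
    · cases b <;> simp [List.foldl_cons, hc, pvLoop, ih]

-- splitOn.go computed against pvSplitSp
theorem pvGo_eq (l : List Char) : ∀ (fuel : Nat) (cur : List Char) (acc : List (List Char)),
    l.length ≤ fuel →
    PySem.Chars.splitOn.go [' '] fuel l cur acc = acc.reverse ++ pvConsHead cur (pvSplitSp l) := by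
  induction l with
  | nil =>
    intro fuel cur acc _
    cases fuel <;> simp [PySem.Chars.splitOn.go, pvSplitSp, pvConsHead]
  | cons c r ih =>
    intro fuel cur acc hlen
    cases fuel with
    | zero => simp at hlen
    | succ f =>
      by_cases hc : c = ' '
      · subst hc
        rw [show PySem.Chars.splitOn.go [' '] (f+1) (' ' :: r) cur acc
              = PySem.Chars.splitOn.go [' '] f r [] (cur.reverse :: acc) by
            simp [PySem.Chars.splitOn.go, List.isPrefixOf]]
        rw [ih f [] (cur.reverse :: acc) (by simpa using Nat.lt_succ_iff.mp (by simpa using hlen))]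
        obtain ⟨w, ws, hw⟩ : ∃ w ws, pvSplitSp r = w :: ws := by
          cases h : pvSplitSp r with
          | nil => exact absurd h (pvSplitSp_ne_nil r)
          | cons w ws => exact ⟨w, ws, rfl⟩
        simp [pvSplitSp, hw, pvConsHead]
      · rw [show PySem.Chars.splitOn.go [' '] (f+1) (c :: r) cur acc
              = PySem.Chars.splitOn.go [' '] f r (c :: cur) acc by
            have hb : (' ' == c) = false := by
              simp only [beq_eq_false_iff_ne, ne_eq]
              exact fun h => hc h.symm
            simp [PySem.Chars.splitOn.go, List.isPrefixOf, hb]]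
        rw [ih f (c :: cur) acc (by simpa using Nat.lt_succ_iff.mp (by simpa using hlen))]
        obtain ⟨w, ws, hw⟩ : ∃ w ws, pvSplitSp r = w :: ws := by
          cases h : pvSplitSp r with
          | nil => exact absurd h (pvSplitSp_ne_nil r)
          | cons w ws => exact ⟨w, ws, rfl⟩
        simp [pvSplitSp, hw, pvConsHead, hc]

theorem pvSplitOn_eq (l : List Char) : PySem.Chars.splitOn l [' '] = pvSplitSp l := by
  unfold PySem.Chars.splitOn
  rw [pvGo_eq l (l.length + 1) [] [] (by omega)]
  obtain ⟨w, ws, hw⟩ : ∃ w ws, pvSplitSp l = w :: ws := by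
    cases h : pvSplitSp l with
    | nil => exact absurd h (pvSplitSp_ne_nil l)
    | cons w ws => exact ⟨w, ws, rfl⟩
  simp [hw, pvConsHead]

theorem pvCapWord_nil : pvCapWord [] = [] := rfl

theorem pvCapWord_cons (c : Char) (t : List Char) :
    pvCapWord (c :: t) = PySem.Chars.upperChar c :: PySem.Chars.lower t := by
  unfold pvCapWord
  rw [PySem.List.slice_to _ (by norm_num), PySem.List.slice_from _ (by norm_num)]
  simp [PySem.Chars.upper, PySem.Chars.lower]

theorem pvJoin_cons (w : List Char) (ws : List (List Char)) :
    PySem.Chars.join [' '] (w :: ws) = w ++ ws.flatMap (fun v => ' ' :: v) := by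
  induction ws generalizing w with
  | nil => simp [PySem.Chars.join, List.intercalate]
  | cons v t ih =>
    have : PySem.Chars.join [' '] (w :: v :: t) = w ++ ' ' :: PySem.Chars.join [' '] (v :: t) := by
      simp [PySem.Chars.join, List.intercalate, List.intersperse]
    rw [this, ih]
    simp

theorem pvSplit_loop (cs : List Char) : ∀ (w : List Char) (ws : List (List Char)),
    pvSplitSp cs = w :: ws →
    PySem.Chars.lower w ++ ws.flatMap (fun v => ' ' :: pvCapWord v) = pvLoop false cs ∧
    pvCapWord w ++ ws.flatMap (fun v => ' ' :: pvCapWord v) = pvLoop true cs := by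
  induction cs with
  | nil =>
    intro w ws h
    simp [pvSplitSp] at h
    obtain ⟨hw, hws⟩ := h
    subst hw; subst hws
    simp [pvLoop, PySem.Chars.lower, pvCapWord_nil]
  | cons c r ih =>
    intro w ws h
    obtain ⟨w', ws', hw'⟩ : ∃ w' ws', pvSplitSp r = w' :: ws' := by
      cases hr : pvSplitSp r with
      | nil => exact absurd hr (pvSplitSp_ne_nil r)
      | cons a b => exact ⟨a, b, rfl⟩
    obtain ⟨ih1, ih2⟩ := ih w' ws' hw'
    by_cases hc : c = ' '
    · subst hc
      simp [pvSplitSp, hw'] at h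
      obtain ⟨hw, hws⟩ := h
      subst hw; subst hws
      constructor
      · show PySem.Chars.lower [] ++ (w' :: ws').flatMap (fun v => ' ' :: pvCapWord v) = pvLoop false (' ' :: r)
        simp only [List.flatMap_cons, pvLoop]
        simp [PySem.Chars.lower, ih2]
      · show pvCapWord [] ++ (w' :: ws').flatMap (fun v => ' ' :: pvCapWord v) = pvLoop true (' ' :: r)
        simp only [List.flatMap_cons, pvLoop]
        simp [pvCapWord_nil, ih2]
    · simp [pvSplitSp, hc, hw'] at h
      obtain ⟨hw, hws⟩ := h
      subst hw; subst hws
      constructor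
      · show PySem.Chars.lower (c :: w') ++ ws'.flatMap (fun v => ' ' :: pvCapWord v) = pvLoop false (c :: r)
        simp only [PySem.Chars.lower, List.map_cons, List.cons_append, pvLoop, if_neg hc]
        rw [show PySem.Chars.lowerChar c :: (w'.map PySem.Chars.lowerChar ++ ws'.flatMap (fun v => ' ' :: pvCapWord v))
              = PySem.Chars.lowerChar c :: (PySem.Chars.lower w' ++ ws'.flatMap (fun v => ' ' :: pvCapWord v)) from rfl, ih1]
        simp
      · show pvCapWord (c :: w') ++ ws'.flatMap (fun v => ' ' :: pvCapWord v) = pvLoop true (c :: r)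
        rw [pvCapWord_cons]
        simp only [List.cons_append, pvLoop, if_neg hc]
        rw [show PySem.Chars.lower w' ++ ws'.flatMap (fun v => ' ' :: pvCapWord v) = pvLoop false r from ih1]
        simp

theorem pvJoinB (cs : List Char) :
    PySem.Chars.join [' '] ((pvSplitSp cs).map pvCapWord) = pvLoop true cs := by
  obtain ⟨w, ws, hw⟩ : ∃ w ws, pvSplitSp cs = w :: ws := by
    cases h : pvSplitSp cs with
    | nil => exact absurd h (pvSplitSp_ne_nil cs)
    | cons a b => exact ⟨a, b, rfl⟩
  rw [hw, List.map_cons, pvJoin_cons]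
  have hflat : (ws.map pvCapWord).flatMap (fun v => ' ' :: v) = ws.flatMap (fun v => ' ' :: pvCapWord v) := by
    simp [List.flatMap_map]
  rw [hflat]
  exact (pvSplit_loop cs w ws hw).2

-- ===== VERDICT (by name: the statement is the Claim_ definition above) =====
theorem manual_title_spec : Claim_equal_manual_title := by
  intro s _ hpre
  unfold Spec_manual_title manual_title manual_title_alt
  obtain ⟨c, r, hcs⟩ : ∃ c r, s.toList = c :: r := by
    cases h : s.toList with
    | nil => exact absurd (String.toList_inj.mp (by simp [h])) hpre
    | cons a b => exact ⟨a, b, rfl⟩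
  rw [hcs, pvSplitOn_eq, pvJoinB]
  simp only [pvFold_eq]
  by_cases hc : c = ' '
  · subst hc
    rw [show pvLoop false (' ' :: r) = ' ' :: pvLoop true r by simp [pvLoop]]
    rw [show pvLoop true (' ' :: r) = ' ' :: pvLoop true r by simp [pvLoop]]
    simp only [List.nil_append, PySem.List.pyGet?_zero_cons]
    rw [PySem.List.slice_from _ (by norm_num)]
    simp [show PySem.Chars.upperChar ' ' = ' ' from rfl]
  · rw [show pvLoop false (c :: r) = PySem.Chars.lowerChar c :: pvLoop false r by simp [pvLoop, hc]]
    rw [show pvLoop true (c :: r) = PySem.Chars.upperChar c :: pvLoop false r by simp [pvLoop, hc]]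
    simp only [List.nil_append, PySem.List.pyGet?_zero_cons]
    rw [PySem.List.slice_from _ (by norm_num)]
    simp [pvUpperLower]
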